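-- pv_equiv track=rewrite | github.com/1TTO/boolean_solver | backend/boolean_solver.py | get_kv_binary_var_assignments
-- ===== SOURCE A (Python) =====
-- def get_kv_binary_var_assignments(variables_amount):
--     kv_var_assignments = ["01"] if variables_amount >= 1 else []
--
--     for i in range(1, variables_amount):
--         for j, kv_assignment in enumerate(kv_var_assignments):
--             kv_var_assignments[j] = kv_assignment + kv_assignment[::-1]
--
--         new_kv_var_assignment = "0" * 2**i
--         new_kv_var_assignment = new_kv_var_assignment + "1" * 2**i
--
--         kv_var_assignments.append(new_kv_var_assignment)
--
--     return kv_var_assignments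
-- ===== SOURCE B (Python) =====
-- def get_kv_binary_var_assignments(variables_amount):
--     # Bit i of the reflected Gray code g(p) = p ^ (p >> 1) is periodic in p:
--     # 2**i zeros, then alternating runs of 2**(i+1) ones and 2**(i+1) zeros.
--     # Build each column directly from that run-length pattern.
--     if variables_amount < 1:
--         return []
--     total = 2 ** variables_amount
--     result = []
--     for i in range(variables_amount):
--         half = 2 ** i
--         block = 2 * half
--         reps = total // (2 * block) + 1
--         s = "0" * half + ("1" * block + "0" * block) * reps
--         result.append(s[:total])
--     return result
-- ===== Notes on version B (the rewrite author's own statement) =====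
-- stated objective: alternative
-- what changed: Replaces the reflect-and-double rewriting of every column at every loop step by building each column once from the closed-form periodicity of its Gray-code bit (a short zero prefix, then alternating equal runs of ones and zeros, truncated to the map length) via bulk string repetition.
import Mathlib
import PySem

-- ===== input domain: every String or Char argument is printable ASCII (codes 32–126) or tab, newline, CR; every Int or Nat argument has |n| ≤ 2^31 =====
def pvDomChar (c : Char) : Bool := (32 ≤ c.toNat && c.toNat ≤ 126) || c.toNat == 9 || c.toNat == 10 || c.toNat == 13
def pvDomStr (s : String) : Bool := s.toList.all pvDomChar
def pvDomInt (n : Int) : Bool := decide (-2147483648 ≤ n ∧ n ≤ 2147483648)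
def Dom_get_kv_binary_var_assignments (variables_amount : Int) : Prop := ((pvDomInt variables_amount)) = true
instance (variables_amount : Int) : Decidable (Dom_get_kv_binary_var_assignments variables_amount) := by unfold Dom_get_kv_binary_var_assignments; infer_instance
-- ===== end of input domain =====

-- B replaces A's reflect-and-double string rewriting by a direct per-column
-- computation from the closed-form reflected Gray code g(p)=p^(p>>1) (objective: alternative).


-- ===== PORT A =====
-- literal port of A; strings are handled as their List Char contents
-- (s + s[::-1] → l ++ l.reverse, "0"*2**i → List.replicate, exact on any string)
def get_kv_binary_var_assignments (variables_amount : Int) : List String :=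
  let init : List String := if variables_amount ≥ 1 then ["01"] else []
  (PySem.List.pyRange 1 variables_amount 1).foldl
    (fun kv_var_assignments i =>
      (kv_var_assignments.map
        (fun kv_assignment =>
          String.ofList (kv_assignment.toList ++ kv_assignment.toList.reverse))) ++
      [String.ofList (List.replicate (2 ^ i.toNat) '0' ++ List.replicate (2 ^ i.toNat) '1')])
    init

-- ===== PORT B =====
-- literal port of Source B; "0"*half / "1"*block → List.replicate, string repetition
-- ("…")*reps → flatten of replicate, slice s[:total] → take (exact: prefix slice)
def get_kv_binary_var_assignments_alt (variables_amount : Int) : List String :=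
  if variables_amount < 1 then []
  else
    let total := 2 ^ variables_amount.toNat
    (List.range variables_amount.toNat).map (fun i =>
      let half := 2 ^ i
      let block := 2 * half
      let reps := total / (2 * block) + 1
      let s := List.replicate half '0' ++
        (List.replicate reps (List.replicate block '1' ++ List.replicate block '0')).flatten
      String.ofList (s.take total))

-- ===== PRECONDITION & SPEC =====
def Spec_get_kv_binary_var_assignments (variables_amount : Int) (out : List String) : Prop := out = get_kv_binary_var_assignments_alt variables_amount
instance (variables_amount : Int) (out : List String) : Decidable (Spec_get_kv_binary_var_assignments variables_amount out) := by unfold Spec_get_kv_binary_var_assignments; infer_instance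

-- ===== CLAIM (what is proved, stated in full; the proofs are below) =====
def Claim_equal_get_kv_binary_var_assignments : Prop := ∀ (variables_amount : Int), Dom_get_kv_binary_var_assignments variables_amount → Spec_get_kv_binary_var_assignments variables_amount (get_kv_binary_var_assignments variables_amount)

-- ===== LEMMAS AND PROOFS =====

-- character written by B at column i, position p
def grayChar (i p : ℕ) : Char :=
  if ((p ^^^ (p >>> 1)) >>> i) &&& 1 = 1 then '1' else '0'

-- the full column i of an n-variable map
def colSpec (n i : ℕ) : List Char := (List.range (2 ^ n)).map (grayChar i)

theorem grayChar_eq_testBit (i p : ℕ) :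
    grayChar i p = if (p.testBit i).xor (p.testBit (i + 1)) then '1' else '0' := by
  unfold grayChar
  have h1 : ((p ^^^ (p >>> 1)) >>> i) &&& 1 = 1 ↔ (p ^^^ (p >>> 1)).testBit i = true := by
    rw [Nat.testBit]
    simp [Nat.and_one_is_mod, Nat.one_and_eq_mod_two]
  have h2 : (p ^^^ (p >>> 1)).testBit i = (p.testBit i).xor (p.testBit (i + 1)) := by
    rw [Nat.testBit_xor, Nat.testBit_shiftRight, Nat.add_comm]
  by_cases hb : (p.testBit i).xor (p.testBit (i + 1)) = true
  · rw [if_pos (h1.mpr (by rw [h2]; exact hb)), if_pos hb]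
  · rw [if_neg (fun hc => hb (by rw [← h2]; exact h1.mp hc)), if_neg hb]

theorem range_reverse_map (m : ℕ) :
    (List.range m).reverse = (List.range m).map (fun q => m - 1 - q) := by
  apply List.ext_getElem
  · simp
  · intro k h1 h2
    simp only [List.getElem_reverse, List.getElem_map, List.getElem_range,
      List.length_range] at *

theorem testBit_compl {n q i : ℕ} (hq : q < 2 ^ n) (hi : i < n) :
    (2 ^ n - 1 - q).testBit i = !q.testBit i := by
  have h : 2 ^ n - 1 - q = 2 ^ n - (q + 1) := by omega
  rw [h, Nat.testBit_two_pow_sub_succ hq]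
  simp [hi]

theorem grayChar_reflect {n q i : ℕ} (hq : q < 2 ^ n) (hi : i < n) :
    grayChar i (2 ^ n + q) = grayChar i (2 ^ n - 1 - q) := by
  have hlt : 2 ^ n - 1 - q < 2 ^ n := by omega
  rw [grayChar_eq_testBit, grayChar_eq_testBit]
  rw [Nat.testBit_two_pow_add_gt hi, testBit_compl hq hi]
  rcases Nat.lt_or_ge (i + 1) n with h | h
  · rw [Nat.testBit_two_pow_add_gt h, testBit_compl hq h]
    cases q.testBit i <;> cases q.testBit (i + 1) <;> rfl
  · have hn : i + 1 = n := by omega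
    subst hn
    rw [Nat.testBit_two_pow_add_eq, Nat.testBit_lt_two_pow hq,
      Nat.testBit_lt_two_pow hlt]
    cases q.testBit i <;> rfl

theorem range_two_pow_succ (n : ℕ) :
    List.range (2 ^ (n + 1)) = List.range (2 ^ n) ++ (List.range (2 ^ n)).map (2 ^ n + ·) := by
  rw [← List.range_add]
  congr 1
  ring

-- existing columns: reflect-and-double
theorem colSpec_succ_lt {n i : ℕ} (hi : i < n) :
    colSpec (n + 1) i = colSpec n i ++ (colSpec n i).reverse := by
  unfold colSpec
  rw [range_two_pow_succ, List.map_append, List.map_map, ← List.map_reverse,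
    range_reverse_map, List.map_map]
  congr 1
  apply List.map_congr_left
  intro q hq
  simp only [List.mem_range] at hq
  exact grayChar_reflect hq hi

-- the new column 0^(2^n) 1^(2^n)
theorem colSpec_succ_self (n : ℕ) :
    colSpec (n + 1) n = List.replicate (2 ^ n) '0' ++ List.replicate (2 ^ n) '1' := by
  unfold colSpec
  rw [range_two_pow_succ, List.map_append, List.map_map]
  congr 1
  · rw [List.eq_replicate_iff]
    refine ⟨by simp, ?_⟩
    intro c hc
    rw [List.mem_map] at hc
    obtain ⟨p, hp, rfl⟩ := hc
    simp only [List.mem_range] at hp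
    have h1 : p < 2 ^ (n + 1) := lt_of_lt_of_le hp (Nat.pow_le_pow_right (by norm_num) (by omega))
    rw [grayChar_eq_testBit, Nat.testBit_lt_two_pow hp, Nat.testBit_lt_two_pow h1]
    rfl
  · rw [List.eq_replicate_iff]
    refine ⟨by simp, ?_⟩
    intro c hc
    rw [List.mem_map] at hc
    obtain ⟨p, hp, rfl⟩ := hc
    simp only [List.mem_range] at hp
    have h1 : 2 ^ n + p < 2 ^ (n + 1) := by
      have : 2 ^ (n + 1) = 2 ^ n + 2 ^ n := by ring
      omega
    simp only [Function.comp]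
    rw [grayChar_eq_testBit, Nat.testBit_two_pow_add_eq, Nat.testBit_lt_two_pow hp,
      Nat.testBit_lt_two_pow h1]
    rfl

def stepA (kv : List String) (i : Int) : List String :=
  (kv.map (fun s => String.ofList (s.toList ++ s.toList.reverse))) ++
    [String.ofList (List.replicate (2 ^ i.toNat) '0' ++ List.replicate (2 ^ i.toNat) '1')]

theorem colSpec_one : colSpec 1 0 = ['0', '1'] := by decide

-- the loop invariant of A: after processing range(1, n) the list holds the Gray-code columns
theorem foldA_invariant (n : ℕ) (hn : 1 ≤ n) :
    (PySem.List.pyRange 1 (n : Int) 1).foldl stepA ["01"] =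
      (List.range n).map (fun i => String.ofList (colSpec n i)) := by
  induction n with
  | zero => omega
  | succ m ih =>
    rcases Nat.lt_or_ge m 1 with hm | hm
    · interval_cases m
      rw [PySem.List.pyRange_one_eq_nil (by norm_num)]
      simp [List.range_succ, colSpec_one]
    · have hcast : ((m + 1 : ℕ) : Int) = (m : Int) + 1 := by push_cast; ring
      rw [hcast, PySem.List.pyRange_one_succ_right (by exact_mod_cast hm),
        List.foldl_append, ih hm]
      unfold stepA
      simp only [List.foldl_cons, List.foldl_nil]
      rw [List.range_succ, List.map_append, List.map_map]
      congr 1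
      · apply List.map_congr_left
        intro i hi
        simp only [List.mem_range] at hi
        simp only [Function.comp]
        rw [String.toList_ofList, colSpec_succ_lt hi]
      · simp only [List.map_cons, List.map_nil]
        rw [colSpec_succ_self]
        norm_num

theorem grayChar_div (i p : ℕ) :
    grayChar i p = if (p + 2 ^ i) / 2 ^ (i + 1) % 2 = 1 then '1' else '0' := by
  rw [grayChar_eq_testBit]
  have hL : 0 < 2 ^ i := Nat.two_pow_pos i
  set L := 2 ^ i with hLdef
  have hpow : 2 ^ (i + 1) = 2 * L := by rw [hLdef, pow_succ]; ring
  have hdm := Nat.div_add_mod p (2 * L)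
  set a := p / (2 * L) with ha
  set b := p % (2 * L) with hb
  have hblt : b < 2 * L := Nat.mod_lt _ (by omega)
  have ht1 : p.testBit (i + 1) = decide (a % 2 = 1) := by
    rw [Nat.testBit_eq_decide_div_mod_eq, hpow]
  have hpL : p / L = 2 * a + b / L := by
    rw [← hdm]
    rw [show 2 * L * a + b = L * (2 * a) + b by ring]
    rw [Nat.mul_add_div hL]
  have ht0 : p.testBit i = decide (b / L = 1) := by
    rw [Nat.testBit_eq_decide_div_mod_eq, ← hLdef, hpL]
    have : (2 * a + b / L) % 2 = b / L % 2 := by omega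
    rw [this]
    have hbL : b / L = 0 ∨ b / L = 1 := by
      rcases Nat.lt_or_ge b L with h | h
      · left; exact Nat.div_eq_of_lt h
      · right
        have := Nat.div_le_div_right (c := L) (Nat.le_of_lt_succ (Nat.lt_succ_of_lt hblt))
        have h1 : 1 ≤ b / L := (Nat.le_div_iff_mul_le hL).mpr (by omega)
        have h2 : b / L < 2 := Nat.div_lt_of_lt_mul (by omega)
        omega
    rcases hbL with h | h <;> simp [h]
  have hrhs : (p + L) / (2 * L) = a + (b + L) / (2 * L) := by
    rw [← hdm]
    rw [show 2 * L * a + b + L = 2 * L * a + (b + L) by ring]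
    rw [Nat.mul_add_div (by omega)]
  rw [ht0, ht1, hpow, hrhs]
  rcases Nat.lt_or_ge b L with h | h
  · rw [Nat.div_eq_of_lt h, Nat.div_eq_of_lt (by omega : b + L < 2 * L)]
    by_cases ha2 : a % 2 = 1 <;> simp [ha2]
  · have hb1 : b / L = 1 := by
      have h1 : 1 ≤ b / L := (Nat.le_div_iff_mul_le hL).mpr (by omega)
      have h2 : b / L < 2 := Nat.div_lt_of_lt_mul (by omega)
      omega
    have hb2 : (b + L) / (2 * L) = 1 := by
      have h1 : 1 ≤ (b + L) / (2 * L) := (Nat.le_div_iff_mul_le (by omega)).mpr (by omega)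
      have h2 : (b + L) / (2 * L) < 2 := Nat.div_lt_of_lt_mul (by omega)
      omega
    rw [hb1, hb2]
    by_cases ha2 : a % 2 = 1 <;> simp [ha2] <;> omega

theorem flatten_replicate_getElem {α : Type} (c : List α) (r q : ℕ) (hc : 0 < c.length)
    (hq : q < ((List.replicate r c).flatten).length) :
    ((List.replicate r c).flatten)[q] = getElem c (q % c.length) (Nat.mod_lt q hc) := by
  induction r generalizing q with
  | zero => simp at hq
  | succ m ih =>
    have hg : (List.replicate (m + 1) c).flatten = c ++ (List.replicate m c).flatten := by
      rw [List.replicate_succ, List.flatten_cons]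
    have hq' : q < (c ++ (List.replicate m c).flatten).length := by rw [← hg]; exact hq
    have hmain : (c ++ (List.replicate m c).flatten)[q]'hq' = getElem c (q % c.length) (Nat.mod_lt q hc) := by
      rcases Nat.lt_or_ge q c.length with h | h
      · rw [List.getElem_append_left h]
        congr 1
        exact (Nat.mod_eq_of_lt h).symm
      · rw [List.getElem_append_right h]
        have hq2 : q - c.length < ((List.replicate m c).flatten).length := by
          simp only [List.length_append] at hq'
          omega
        rw [ih (q - c.length) hq2]
        congr 1
        conv_rhs => rw [show q = c.length + (q - c.length) by omega]
        rw [Nat.add_mod_left]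
    calc ((List.replicate (m + 1) c).flatten)[q] = (c ++ (List.replicate m c).flatten)[q]'hq' := by
          congr 1
        _ = getElem c (q % c.length) (Nat.mod_lt q hc) := hmain

theorem col_pattern (n i : ℕ) (_hi : i < n) :
    ((List.replicate (2 ^ i) '0' ++
      (List.replicate (2 ^ n / (2 * (2 * 2 ^ i)) + 1)
        (List.replicate (2 * 2 ^ i) '1' ++ List.replicate (2 * 2 ^ i) '0')).flatten).take (2 ^ n))
      = colSpec n i := by
  have hL : 0 < 2 ^ i := Nat.two_pow_pos i
  set half := 2 ^ i with hhalf
  set block := 2 * half with hblock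
  set total := 2 ^ n with htotal
  set chunk := List.replicate block '1' ++ List.replicate block '0' with hchunk
  set reps := total / (2 * block) + 1 with hreps
  have hclen : chunk.length = 2 * block := by simp [hchunk]; omega
  have hflen : ((List.replicate reps chunk).flatten).length = reps * (2 * block) := by
    simp [List.length_flatten, hclen, List.map_replicate, List.sum_replicate]
  have hbig : total ≤ half + reps * (2 * block) := by
    have hdm := Nat.div_add_mod total (2 * block)
    have hm : total % (2 * block) < 2 * block := Nat.mod_lt _ (by omega)
    have hexp : reps * (2 * block) = 2 * block * (total / (2 * block)) + 2 * block := by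
      rw [hreps]; ring
    omega
  apply List.ext_getElem
  · simp only [List.length_take, List.length_append, List.length_replicate, hflen, colSpec,
      List.length_map, List.length_range, ← htotal]
    omega
  · intro k h1 h2
    have hk : k < total := by
      simp only [List.length_take] at h1; omega
    rw [List.getElem_take]
    have hrhs : getElem (colSpec n i) k h2 = grayChar i k := by
      simp [colSpec]
    rw [hrhs, grayChar_div]
    have hpow : 2 ^ (i + 1) = block := by rw [hblock, hhalf, pow_succ]; ring
    rw [hpow, ← hhalf]
    rcases Nat.lt_or_ge k half with h | h
    · rw [List.getElem_append_left (by simpa using h)]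
      rw [List.getElem_replicate]
      rw [Nat.div_eq_of_lt (by omega : k + half < block)]
      norm_num
    · rw [List.getElem_append_right (by simpa using h)]
      simp only [List.length_replicate]
      set q := k - half with hq
      have hqlt : q < ((List.replicate reps chunk).flatten).length := by
        rw [hflen]
        have hexp : reps * (2 * block) = 2 * block * (total / (2 * block)) + 2 * block := by
          rw [hreps]; ring
        have hdm := Nat.div_add_mod total (2 * block)
        omega
      rw [flatten_replicate_getElem chunk reps q (by omega) hqlt]
      have hchunkget : ∀ (j : ℕ) (hj : j < chunk.length),
          getElem chunk j hj = (if j < block then '1' else '0') := by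
        intro j hj
        have hj2 : j < (List.replicate block '1' ++ List.replicate block '0').length := by
          have := hclen ▸ hj
          simp only [List.length_append, List.length_replicate]
          omega
        have heq : getElem chunk j hj =
            getElem (List.replicate block '1' ++ List.replicate block '0') j hj2 := rfl
        rw [heq]
        rcases Nat.lt_or_ge j block with hj' | hj'
        · rw [List.getElem_append_left (by simpa using hj')]
          rw [List.getElem_replicate, if_pos hj']
        · rw [List.getElem_append_right (by simpa using hj')]
          rw [List.getElem_replicate, if_neg (by omega)]
      rw [hchunkget]
      set r := q % chunk.length with hr
      have hrq : q % (2 * block) = r := by rw [hr, hclen]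
      have hrlt : r < 2 * block := by rw [← hrq]; exact Nat.mod_lt _ (by omega)
      have hkh : k + half = q + block := by omega
      set k0 := q / (2 * block) with hk0
      have hqdm : q = 2 * block * k0 + q % (2 * block) := (Nat.div_add_mod q (2 * block)).symm
      have hdiv : (k + half) / block = 2 * k0 + (r / block + 1) := by
        rw [hkh]
        conv_lhs => rw [hqdm, hrq]
        rw [show 2 * block * k0 + r + block = block * (2 * k0) + (r + block) by ring]
        rw [Nat.mul_add_div (by omega), Nat.add_div_right _ (by omega)]
      rw [hdiv]
      rcases Nat.lt_or_ge r block with h' | h'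
      · rw [Nat.div_eq_of_lt h', if_pos h', if_pos (by omega)]
      · have h1' : 1 ≤ r / block := (Nat.le_div_iff_mul_le (by omega)).mpr (by omega)
        have h2' : r / block < 2 := Nat.div_lt_of_lt_mul (by omega)
        have hone : r / block = 1 := by omega
        rw [hone, if_neg (by omega), if_neg (by omega)]

theorem alt_eq_colSpec (v : Int) (hv : 1 ≤ v) :
    get_kv_binary_var_assignments_alt v =
      (List.range v.toNat).map (fun i => String.ofList (colSpec v.toNat i)) := by
  unfold get_kv_binary_var_assignments_alt
  rw [if_neg (by omega)]
  apply List.map_congr_left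
  intro i hi
  rw [List.mem_range] at hi
  show String.ofList ((List.replicate (2 ^ i) '0' ++
      (List.replicate (2 ^ v.toNat / (2 * (2 * 2 ^ i)) + 1)
        (List.replicate (2 * 2 ^ i) '1' ++ List.replicate (2 * 2 ^ i) '0')).flatten).take
          (2 ^ v.toNat)) = String.ofList (colSpec v.toNat i)
  rw [col_pattern v.toNat i hi]

-- ===== VERDICT (by name: the statement is the Claim_ definition above) =====
theorem get_kv_binary_var_assignments_spec : Claim_equal_get_kv_binary_var_assignments := by
  intro v _
  unfold Spec_get_kv_binary_var_assignments get_kv_binary_var_assignments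
  rcases Int.lt_or_le v 1 with hv | hv
  · rw [PySem.List.pyRange_one_eq_nil (by omega)]
    simp only [List.foldl_nil]
    rw [if_neg (by omega)]
    unfold get_kv_binary_var_assignments_alt
    rw [if_pos hv]
  · have hn : 1 ≤ v.toNat := by omega
    have hcast : ((v.toNat : ℕ) : Int) = v := by omega
    rw [if_pos (by omega)]
    have := foldA_invariant v.toNat hn
    rw [hcast] at this
    rw [alt_eq_colSpec v hv, ← this]
    rfl
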